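-- pv_equiv track=rewrite | github.com/dparres/Pretrained-Document-Recognition-Transformers | utils_ctc.py | create_char_dicts
-- ===== SOURCE A (Python) =====
-- def create_char_dicts(list_strings):
--     text_to_seq = {}
--     seq_to_text = {}
--     value = 1 # 0 is blank token
--
--     for text in list_strings:
--         for character in text:
--             if character not in text_to_seq:
--                 text_to_seq[character] = value
--                 seq_to_text[value] = character
--                 value += 1
--     return text_to_seq, seq_to_text
-- ===== SOURCE B (Python) =====
-- def create_char_dicts(list_strings):
--     stream = "".join(list_strings)
--     chars = sorted(set(stream), key=stream.index)
--     text_to_seq = dict(zip(chars, range(1, len(chars) + 1)))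
--     seq_to_text = dict(zip(range(1, len(chars) + 1), chars))
--     return text_to_seq, seq_to_text
-- ===== Notes on version B (the rewrite author's own statement) =====
-- stated objective: alternative
-- what changed: Instead of A's single interleaved loop with a membership check and a manual counter, B joins the strings, takes the character SET and recovers the first-appearance order by SORTING it with key=stream.index, then builds both dicts by zipping with range(1, k+1); correctness rests on first-occurrence indices being distinct, so the sort reproduces first-appearance order exactly.
import Mathlib
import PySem

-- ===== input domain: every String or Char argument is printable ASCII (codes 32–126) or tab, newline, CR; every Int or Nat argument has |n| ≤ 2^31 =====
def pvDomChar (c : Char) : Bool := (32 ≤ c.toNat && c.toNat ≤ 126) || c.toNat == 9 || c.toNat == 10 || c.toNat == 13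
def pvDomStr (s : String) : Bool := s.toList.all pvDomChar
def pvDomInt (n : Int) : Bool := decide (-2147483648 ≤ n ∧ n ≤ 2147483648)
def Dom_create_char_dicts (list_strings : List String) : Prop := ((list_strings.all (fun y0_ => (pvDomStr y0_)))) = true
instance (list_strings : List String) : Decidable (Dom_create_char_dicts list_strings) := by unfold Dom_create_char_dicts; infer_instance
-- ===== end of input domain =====

-- B rebuilds the dicts by a different algorithm: join the strings, take the character SET and
-- recover first-appearance order by SORTING it with key = first-occurrence index, then zip with
-- range(1, k+1) — instead of A's interleaved membership-check-and-counter loop (objective: alternative).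


-- ===== PORT A =====
-- one iteration of A's inner loop: the membership check, the two inserts, the counter bump
def ccd_step (st : PySem.Dict String Int × PySem.Dict Int String × Int) (character : Char) :
    PySem.Dict String Int × PySem.Dict Int String × Int :=
  if st.1.contains (String.ofList [character]) then st
  else (st.1.insert (String.ofList [character]) st.2.2,
        st.2.1.insert st.2.2 (String.ofList [character]),
        st.2.2 + 1)

def create_char_dicts (list_strings : List String) : (List (String × Int)) × (List (Int × String)) :=
  let st := list_strings.foldl
    (fun st text => text.toList.foldl ccd_step st)
    (PySem.Dict.empty, PySem.Dict.empty, 1)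
  (st.1.items, st.2.1.items)

-- ===== PORT B =====
def create_char_dicts_alt (list_strings : List String) : (List (String × Int)) × (List (Int × String)) :=
  let stream := list_strings.flatMap (fun text => text.toList)   -- "".join(list_strings)
  -- sorted(set(stream), key=stream.index); every set element occurs in stream, so index? is some
  -- and the .getD 0 default is never taken
  let chars := PySem.List.sorted (PySem.Set.ofList stream)
    (fun c => (PySem.List.index? stream c).getD 0)
  let ks := PySem.List.pyRange 1 ((chars.length : Int) + 1) 1   -- range(1, len(chars)+1)
  ((chars.zip ks).map (fun p => (String.ofList [p.1], p.2)),
   (ks.zip chars).map (fun p => (p.1, String.ofList [p.2])))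

-- ===== PRECONDITION & SPEC =====
def Spec_create_char_dicts (list_strings : List String) (out : (List (String × Int)) × (List (Int × String))) : Prop := out = create_char_dicts_alt list_strings
instance (list_strings : List String) (out : (List (String × Int)) × (List (Int × String))) : Decidable (Spec_create_char_dicts list_strings out) := by unfold Spec_create_char_dicts; infer_instance

-- ===== CLAIM (what is proved, stated in full; the proofs are below) =====
def Claim_equal_create_char_dicts : Prop := ∀ (list_strings : List String), Dom_create_char_dicts list_strings → Spec_create_char_dicts list_strings (create_char_dicts list_strings)

-- ===== LEMMAS AND PROOFS =====

-- the state of A's loop after the distinct characters seen so far are u (in first-appearance order)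
def ccd_mkSt (u : List Char) : PySem.Dict String Int × PySem.Dict Int String × Int :=
  (PySem.Dict.mk ((u.zipIdx 1).map (fun p => (String.ofList [p.1], (p.2 : Int)))),
   PySem.Dict.mk ((u.zipIdx 1).map (fun p => ((p.2 : Int), String.ofList [p.1]))),
   (u.length : Int) + 1)

theorem smk_beq (a c : Char) : (String.ofList [a] == String.ofList [c]) = (a == c) := by
  by_cases h : a = c
  · subst h; simp
  · have h2 : ¬ String.ofList [a] = String.ofList [c] := by
      rw [String.ofList_inj]; simp [h]
    simp [h2, h]

theorem ccd_contains_left (u : List Char) (c : Char) : ∀ (n : Nat),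
    (PySem.Dict.mk ((u.zipIdx n).map (fun p => (String.ofList [p.1], (p.2 : Int))))).contains (String.ofList [c])
    = u.contains c := by
  induction u with
  | nil => intro n; simp [PySem.Dict.contains]
  | cons a as ih =>
    intro n
    simp only [List.zipIdx_cons, List.map_cons, PySem.Dict.contains, List.any_cons,
      List.contains_cons]
    have := ih (n + 1)
    simp only [PySem.Dict.contains] at this
    rw [this, smk_beq]
    have hb : (a == c) = (c == a) := by
      by_cases hac : a = c
      · subst hac; rfl
      · simp [hac, Ne.symm hac]
    rw [hb]

theorem ccd_contains_right (u : List Char) : ∀ (n : Nat),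
    (PySem.Dict.mk ((u.zipIdx n).map (fun p => ((p.2 : Int), String.ofList [p.1])))).contains ((n : Int) + u.length)
    = false := by
  induction u with
  | nil => intro n; simp [PySem.Dict.contains]
  | cons a as ih =>
    intro n
    simp only [List.zipIdx_cons, List.map_cons, PySem.Dict.contains, List.any_cons]
    have h1 := ih (n + 1)
    simp only [PySem.Dict.contains] at h1
    have h2 : ((n : Int) + (a :: as).length) = (((n + 1 : Nat) : Int) + as.length) := by
      simp only [List.length_cons]; push_cast; ring
    rw [h2, h1]
    simp only [Bool.or_false, beq_eq_false_iff_ne, ne_eq]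
    push_cast; omega

theorem ccd_step_mkSt (u : List Char) (c : Char) :
    ccd_step (ccd_mkSt u) c = ccd_mkSt (PySem.Set.add u c) := by
  unfold ccd_step ccd_mkSt PySem.Set.add PySem.Set.contains
  have hcl := ccd_contains_left u c 1
  by_cases h : u.contains c = true
  · simp only [hcl, h, if_true]
  · have hf : u.contains c = false := by simpa using h
    simp only [hcl, hf, Bool.false_eq_true, if_false]
    refine Prod.ext ?_ (Prod.ext ?_ ?_)
    · apply PySem.Dict.ext
      rw [PySem.Dict.items_insert_of_not_contains _ _ (hcl.trans hf)]
      simp [List.zipIdx_append]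
      omega
    · apply PySem.Dict.ext
      have hk : ((u.length : Int) + 1) = (((1 : Nat) : Int) + u.length) := by push_cast; ring
      rw [hk, PySem.Dict.items_insert_of_not_contains _ _ (ccd_contains_right u 1)]
      simp [List.zipIdx_append]
    · simp

theorem ccd_foldl_mkSt (cs : List Char) : ∀ (u : List Char),
    cs.foldl ccd_step (ccd_mkSt u) = ccd_mkSt (cs.foldl PySem.Set.add u) := by
  induction cs with
  | nil => intro u; rfl
  | cons c cs ih => intro u; simp only [List.foldl_cons, ccd_step_mkSt, ih]

theorem ccd_foldl_flat (ls : List String) : ∀ st,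
    ls.foldl (fun st text => text.toList.foldl ccd_step st) st
    = (ls.flatMap (fun text => text.toList)).foldl ccd_step st := by
  induction ls with
  | nil => intro st; rfl
  | cons t ts ih => intro st; simp [List.foldl_append, ih]

-- first-occurrence indices are strictly increasing along the first-appearance order of set(stream)
theorem ccd_key_pairwise (s : List Char) :
    (PySem.Set.ofList s).Pairwise
      (fun a b => (PySem.List.index? s a).getD 0 < (PySem.List.index? s b).getD 0) := by
  induction s using List.reverseRecOn with
  | nil => simp [PySem.Set.ofList, PySem.Set.empty]
  | append_singleton s c ih =>
    have hfold : PySem.Set.ofList (s ++ [c]) = PySem.Set.add (PySem.Set.ofList s) c := by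
      simp [PySem.Set.ofList, List.foldl_append]
    rw [hfold]
    unfold PySem.Set.add
    have hkey : ∀ a ∈ PySem.Set.ofList s,
        (PySem.List.index? (s ++ [c]) a).getD 0 = (PySem.List.index? s a).getD 0 := by
      intro a ha
      rw [PySem.List.index?_append_of_mem [c] ((PySem.Set.mem_ofList s a).mp ha)]
    by_cases hc : (PySem.Set.ofList s).contains c = true
    · rw [if_pos hc]
      exact ih.imp_of_mem (fun {a b} ha hb h => by rw [hkey a ha, hkey b hb]; exact h)
    · rw [if_neg hc]
      have hcs : c ∉ s := by
        intro hm
        exact hc (by simpa [PySem.Set.contains] using (PySem.Set.mem_ofList s c).mpr hm)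
      rw [List.pairwise_append]
      refine ⟨ih.imp_of_mem (fun {a b} ha hb h => by rw [hkey a ha, hkey b hb]; exact h),
        List.pairwise_singleton _ _, ?_⟩
      intro a ha b hb
      rw [List.mem_singleton] at hb
      rw [hb, hkey a ha, PySem.List.index?_append_singleton_self s c hcs]
      have hmem : a ∈ s := (PySem.Set.mem_ofList s a).mp ha
      obtain ⟨k, hk⟩ := Option.isSome_iff_exists.mp ((PySem.List.index?_isSome_iff s a).mpr hmem)
      obtain ⟨hlt, -, -⟩ := PySem.List.getElem_of_index?_eq_some hk
      rw [hk]
      simpa using hlt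

-- zipping a list with range(a, a+len) is zipIdx a (cast to Int)
theorem ccd_zip_pyRange {α : Type} (u : List α) : ∀ (a : Nat),
    u.zip (PySem.List.pyRange (a : Int) ((a : Int) + u.length) 1)
    = (u.zipIdx a).map (fun p => (p.1, (p.2 : Int))) := by
  induction u with
  | nil => intro a; simp [PySem.List.pyRange_one_eq_nil]
  | cons x xs ih =>
    intro a
    have hlt : (a : Int) < (a : Int) + (x :: xs).length := by
      have : (0 : Int) < (x :: xs).length := by exact_mod_cast Nat.succ_pos xs.length
      omega
    rw [PySem.List.pyRange_one_cons hlt]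
    have harg : (a : Int) + ((x :: xs).length : Int) = ((a + 1 : Nat) : Int) + (xs.length : Int) := by
      push_cast [List.length_cons]; ring
    have hstep : (a : Int) + 1 = ((a + 1 : Nat) : Int) := by push_cast; ring
    simp only [List.zip_cons_cons, List.zipIdx_cons, List.map_cons]
    rw [harg, hstep, ih (a + 1)]

-- ===== VERDICT (by name: the statement is the Claim_ definition above) =====
theorem create_char_dicts_spec : Claim_equal_create_char_dicts := by
  intro ls _
  show create_char_dicts ls = create_char_dicts_alt ls
  unfold create_char_dicts create_char_dicts_alt
  simp only []
  rw [ccd_foldl_flat]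
  have h0 : (PySem.Dict.empty, PySem.Dict.empty, (1 : Int))
      = ccd_mkSt ([] : List Char) := by
    unfold ccd_mkSt; rfl
  rw [h0, ccd_foldl_mkSt]
  have hofl : (ls.flatMap (fun text => text.toList)).foldl PySem.Set.add []
      = PySem.Set.ofList (ls.flatMap (fun text => text.toList)) := rfl
  rw [hofl]
  have hsort : PySem.List.sorted (PySem.Set.ofList (ls.flatMap (fun text => text.toList)))
      (fun c => (PySem.List.index? (ls.flatMap (fun text => text.toList)) c).getD 0)
      = PySem.Set.ofList (ls.flatMap (fun text => text.toList)) :=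
    PySem.List.sorted_eq_of_perm_of_pairwise_lt _ _ _ (List.Perm.refl _)
      (ccd_key_pairwise _)
  rw [hsort]
  set u := PySem.Set.ofList (ls.flatMap (fun text => text.toList)) with hu
  have h1 : ((1 : Nat) : Int) = (1 : Int) := by norm_num
  have hzip : u.zip (PySem.List.pyRange 1 ((u.length : Int) + 1) 1)
      = (u.zipIdx 1).map (fun p => (p.1, (p.2 : Int))) := by
    have := ccd_zip_pyRange u 1
    rw [h1] at this
    rw [add_comm (1 : Int) (u.length : Int)] at this
    exact this
  have hswap : (PySem.List.pyRange 1 ((u.length : Int) + 1) 1).zip u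
      = (u.zip (PySem.List.pyRange 1 ((u.length : Int) + 1) 1)).map Prod.swap := by
    rw [List.zip_swap]
  unfold ccd_mkSt
  refine Prod.ext ?_ ?_
  · show PySem.Dict.items _ = _
    rw [hzip]
    simp [List.map_map, Function.comp]
  · show PySem.Dict.items _ = _
    rw [hswap, hzip]
    simp [List.map_map, Function.comp]
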